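-- pv_equiv track=rewrite | github.com/chabe01/ajout_nvx_tags_osm | traitements/traitements_annexes.py | reconstituer_expression
-- ===== SOURCE A (Python) =====
-- def reconstituer_expression(expression,dict_abreviations_autres):
--     """
--     Reconstituer une expression selon une syntaxe donnée si elle possède des apostrophes ou des tirets
--
--     :param expression:
--     :return:
--     """
--
--     nlle_exp = ""
--     termes_exp = [elem.split("-") for elem in expression.split("'")]
--
--     for i in range(len(termes_exp)):
--         for j in range(len(termes_exp[i])):
--             terme = termes_exp[i][j].capitalize()
--
--             try:
--                 terme = dict_abreviations_autres[terme.upper()] # Modification du terme s'il est dans le dictionnaire des abréviations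
--             except:
--                 pass
--
--             if j != len(termes_exp[i]) - 1:
--                 nlle_exp += terme + "-"
--             else:
--                 nlle_exp += terme
--
--     return nlle_exp
-- ===== SOURCE B (Python) =====
-- def reconstituer_expression(expression, dict_abreviations_autres):
--     """Single left-to-right character scan: accumulate a token, flush it (capitalized,
--     abbreviation-expanded) at each delimiter, dropping apostrophes and keeping dashes."""
--     out = []
--     token = []
--
--     def flush():
--         t = "".join(token).capitalize()
--         out.append(dict_abreviations_autres.get(t.upper(), t))
--         token.clear()
--
--     for ch in expression:
--         if ch == "'":
--             flush()
--         elif ch == "-":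
--             flush()
--             out.append("-")
--         else:
--             token.append(ch)
--     flush()
--     return "".join(out)
-- ===== Notes on version B (the rewrite author's own statement) =====
-- stated objective: idiomatic
-- what changed: Replaced A's nested split-on-apostrophe-then-dash lists walked by index-based for-range loops (with a position test for the trailing dash) by a single left-to-right character scan that accumulates a token and flushes it (capitalized, abbreviation-expanded) at each delimiter, dropping apostrophes and emitting dashes.
import Mathlib
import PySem

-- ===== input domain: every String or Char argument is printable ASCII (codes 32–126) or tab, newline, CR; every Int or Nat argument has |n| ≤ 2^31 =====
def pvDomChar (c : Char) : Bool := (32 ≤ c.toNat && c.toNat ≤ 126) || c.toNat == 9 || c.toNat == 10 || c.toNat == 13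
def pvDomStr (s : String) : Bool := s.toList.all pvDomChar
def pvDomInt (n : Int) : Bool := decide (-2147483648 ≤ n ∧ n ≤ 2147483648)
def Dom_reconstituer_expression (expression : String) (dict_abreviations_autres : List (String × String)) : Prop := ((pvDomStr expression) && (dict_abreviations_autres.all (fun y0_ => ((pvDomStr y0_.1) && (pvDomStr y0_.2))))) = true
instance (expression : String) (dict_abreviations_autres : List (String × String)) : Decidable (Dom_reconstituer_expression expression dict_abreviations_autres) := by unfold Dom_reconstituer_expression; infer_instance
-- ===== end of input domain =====

-- B replaces A's nested split-on-apostrophe-then-dash index loops by a single left-to-right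
-- character scan that flushes the pending token at each delimiter (objective: idiomatic one-pass).


-- shared Python-primitive helpers (used by both ports):
-- str.capitalize — exact on the ASCII domain (first char upper-cased, rest lower-cased)
def pvCapitalize (s : String) : String :=
  match s.toList with
  | [] => ""
  | c :: cs => String.ofList (PySem.Chars.upperChar c :: PySem.Chars.lower cs)

-- dict lookup (association list, first match) — dict[k] / dict.get(k, _)
def pvLookup (d : List (String × String)) (k : String) : Option String :=
  (d.find? (fun p => p.1 == k)).map (·.2)

-- ===== PORT A =====
def reconstituer_expression (expression : String) (dict_abreviations_autres : List (String × String)) : String :=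
  let termes_exp : List (List String) :=
    ((PySem.Str.split? expression "'").getD []).map
      (fun elem => (PySem.Str.split? elem "-").getD [])
  (PySem.List.pyRange 0 (termes_exp.length : Int)).foldl (fun nlle_exp i =>
    let grp := PySem.List.pyGetD termes_exp i []
    (PySem.List.pyRange 0 (grp.length : Int)).foldl (fun nlle_exp j =>
      let terme := pvCapitalize (PySem.List.pyGetD grp j "")
      let terme :=
        match pvLookup dict_abreviations_autres (PySem.Str.upper terme) with
        | some v => v          -- terme found in the abbreviation dict
        | none => terme        -- KeyError → pass
      if j ≠ (grp.length : Int) - 1 then nlle_exp ++ terme ++ "-" else nlle_exp ++ terme)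
      nlle_exp)
    ""

-- ===== PORT B =====
-- flush(): capitalize the pending token and expand it through the dict
def pvFlush (d : List (String × String)) (token : List Char) : String :=
  let t := pvCapitalize (String.ofList token)
  (pvLookup d (PySem.Str.upper t)).getD t

-- the single character scan of Source B (token/out accumulators)
def pvScan (d : List (String × String)) : List Char → List Char → List String → List String
  | [], token, out => out ++ [pvFlush d token]
  | c :: cs, token, out =>
    if c = '\'' then pvScan d cs [] (out ++ [pvFlush d token])
    else if c = '-' then pvScan d cs [] (out ++ [pvFlush d token, "-"])
    else pvScan d cs (token ++ [c]) out

def reconstituer_expression_alt (expression : String) (dict_abreviations_autres : List (String × String)) : String :=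
  PySem.Str.join "" (pvScan dict_abreviations_autres expression.toList [] [])

-- ===== PRECONDITION & SPEC =====
def Spec_reconstituer_expression (expression : String) (dict_abreviations_autres : List (String × String)) (out : String) : Prop := out = reconstituer_expression_alt expression dict_abreviations_autres
instance (expression : String) (dict_abreviations_autres : List (String × String)) (out : String) : Decidable (Spec_reconstituer_expression expression dict_abreviations_autres out) := by unfold Spec_reconstituer_expression; infer_instance

-- ===== CLAIM (what is proved, stated in full; the proofs are below) =====
def Claim_equal_reconstituer_expression : Prop := ∀ (expression : String) (dict_abreviations_autres : List (String × String)), Dom_reconstituer_expression expression dict_abreviations_autres → Spec_reconstituer_expression expression dict_abreviations_autres (reconstituer_expression expression dict_abreviations_autres)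

-- ===== LEMMAS AND PROOFS =====

-- the string-level transform both programs apply to each term
def pvTS (d : List (String × String)) (s : String) : String :=
  (pvLookup d (PySem.Str.upper (pvCapitalize s))).getD (pvCapitalize s)

-- plain concatenation of a list of strings ("".join)
def pvJoinS : List String → String
  | [] => ""
  | a :: l => a ++ pvJoinS l

lemma pvFlat_intersperse (xs : List (List Char)) :
    (List.intersperse ([] : List Char) xs).flatten = xs.flatten := by
  induction xs with
  | nil => simp
  | cons a l ih => cases l <;> simp_all [List.intersperse]

lemma pvJoin_eq (l : List String) : PySem.Str.join "" l = pvJoinS l := by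
  induction l with
  | nil => rfl
  | cons a l ih =>
    rw [pvJoinS, ← ih]
    apply String.toList_inj.mp
    simp [PySem.Str.join, PySem.Chars.join, List.intercalate, pvFlat_intersperse]

-- simple single-character splitter (headI/tail characterization of PySem.Chars.splitOn)
def pvSplit (c0 : Char) : List Char → List (List Char)
  | [] => [[]]
  | c :: cs =>
    if c = c0 then [] :: pvSplit c0 cs
    else (c :: (pvSplit c0 cs).headI) :: (pvSplit c0 cs).tail

lemma pvSplit_ne_nil (c0 : Char) (cs : List Char) : pvSplit c0 cs ≠ [] := by
  cases cs with
  | nil => simp [pvSplit]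
  | cons c cs => simp only [pvSplit]; split <;> simp

lemma pvSplit_head_tail (c0 : Char) (cs : List Char) :
    (pvSplit c0 cs).headI :: (pvSplit c0 cs).tail = pvSplit c0 cs := by
  cases h : pvSplit c0 cs with
  | nil => exact absurd h (pvSplit_ne_nil c0 cs)
  | cons a t => simp

lemma pvSplitOn_go_spec (c0 : Char) :
    ∀ (fuel : ℕ) (l : List Char) (cur : List Char) (acc : List (List Char)),
      l.length < fuel →
      PySem.Chars.splitOn.go [c0] fuel l cur acc =
        acc.reverse ++ (cur.reverse ++ (pvSplit c0 l).headI) :: (pvSplit c0 l).tail := by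
  intro fuel
  induction fuel with
  | zero => intro l cur acc h; omega
  | succ f ih =>
    intro l cur acc h
    cases l with
    | nil => simp [PySem.Chars.splitOn.go, pvSplit]
    | cons c rest =>
      by_cases hc : c = c0
      · subst hc
        rw [PySem.Chars.splitOn.go]
        simp only [List.isPrefixOf, Bool.and_true, beq_self_eq_true, if_pos]
        simp only [List.length_cons, List.drop_succ_cons, List.length_nil, List.drop_zero]
        rw [ih rest [] ((cur.reverse) :: acc) (by simpa using Nat.lt_of_succ_lt_succ h)]
        simp [pvSplit, pvSplit_head_tail]
      · rw [PySem.Chars.splitOn.go]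
        have hpf : List.isPrefixOf [c0] (c :: rest) = false := by
          simp [List.isPrefixOf]
          exact fun h' => absurd h'.symm hc
        rw [hpf]
        simp only [Bool.false_eq_true, if_false]
        rw [ih rest (c :: cur) acc (by simpa using Nat.lt_of_succ_lt_succ h)]
        simp [pvSplit, hc]

lemma pvSplitOn_eq (c0 : Char) (cs : List Char) :
    PySem.Chars.splitOn cs [c0] = pvSplit c0 cs := by
  have h := pvSplitOn_go_spec c0 (cs.length + 1) cs [] [] (by omega)
  simpa [PySem.Chars.splitOn, pvSplit_head_tail] using h

-- prefix lemma: a delimiter-free prefix extends the first piece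
lemma pvSplit_append (c0 : Char) (p l : List Char) (hp : c0 ∉ p) :
    pvSplit c0 (p ++ l) = (p ++ (pvSplit c0 l).headI) :: (pvSplit c0 l).tail := by
  induction p with
  | nil => simpa using (pvSplit_head_tail c0 l).symm
  | cons a p ih =>
    have ha : a ≠ c0 := fun h => hp (h ▸ List.mem_cons_self)
    have hp' : c0 ∉ p := fun h => hp (List.mem_cons_of_mem _ h)
    simp [pvSplit, ha, ih hp']

lemma pvSplit_of_not_mem (c0 : Char) (p : List Char) (hp : c0 ∉ p) :
    pvSplit c0 p = [p] := by
  have := pvSplit_append c0 p [] hp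
  simpa [pvSplit] using this

-- A's inner join: terms of one apostrophe-group joined with dashes, transformed
def pvAV (d : List (String × String)) : List (List Char) → String
  | [] => ""
  | [t] => pvTS d (String.ofList t)
  | t :: ts@(_ :: _) => pvTS d (String.ofList t) ++ "-" ++ pvAV d ts

-- A's whole value on the split structure
def pvProcA (d : List (String × String)) (cs : List Char) : String :=
  pvJoinS ((pvSplit '\'' cs).map (fun g => pvAV d (pvSplit '-' g)))

-- fold over a list appending f of each elem
lemma pvFoldl_append {α : Type} (f : α → String) :
    ∀ (l : List α) (acc : String),
      l.foldl (fun a x => a ++ f x) acc = acc ++ pvJoinS (l.map f) := by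
  intro l
  induction l with
  | nil => intro acc; simp [pvJoinS]
  | cons x l ih => intro acc; simp [ih, pvJoinS, String.append_assoc]

lemma pvFlush_eq (d : List (String × String)) (t : List Char) :
    pvFlush d t = pvTS d (String.ofList t) := rfl

-- A's inner loop as a named function (syntactically the port's inner fold)
def pvInner (d : List (String × String)) (grp : List String) (acc : String) : String :=
  (PySem.List.pyRange 0 ((grp.length : Int))).foldl (fun nlle_exp j =>
    let terme := pvCapitalize (PySem.List.pyGetD grp j "")
    let terme :=
      match pvLookup d (PySem.Str.upper terme) with
      | some v => v
      | none => terme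
    if j ≠ ((grp.length : Int)) - 1 then nlle_exp ++ terme ++ "-" else nlle_exp ++ terme)
    acc

-- A's inner range-fold evaluated on a group written as gs ++ [t]
lemma pvInnerRange (d : List (String × String)) (gs : List String) (t : String) (acc : String) :
    pvInner d (gs ++ [t]) acc
    = acc ++ pvJoinS (gs.map (fun s => pvTS d s ++ "-")) ++ pvTS d t := by
  unfold pvInner
  have hlen : (((gs ++ [t]).length : Int)) = (gs.length : Int) + 1 := by
    push_cast [List.length_append, List.length_cons, List.length_nil]; omega
  rw [hlen, PySem.List.pyRange_one_append 0 (gs.length : Int) ((gs.length : Int) + 1)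
    (by positivity) (by omega), List.foldl_append]
  -- first gs.length iterations: always the dash branch, reading from gs
  have hcongr :
      (PySem.List.pyRange 0 (gs.length : Int)).foldl (fun nlle_exp j =>
        let terme := pvCapitalize (PySem.List.pyGetD (gs ++ [t]) j "")
        let terme :=
          match pvLookup d (PySem.Str.upper terme) with
          | some v => v
          | none => terme
        if j ≠ ((gs.length : Int) + 1) - 1 then nlle_exp ++ terme ++ "-" else nlle_exp ++ terme)
        acc
      = (PySem.List.pyRange 0 (gs.length : Int)).foldl
          (fun nlle_exp j => nlle_exp ++ (pvTS d (PySem.List.pyGetD gs j "") ++ "-")) acc := by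
    apply PySem.List.foldl_congr_mem
    intro a j hj
    rcases PySem.List.mem_pyRange_one.mp hj with ⟨hj0, hjn⟩
    have hget : PySem.List.pyGetD (gs ++ [t]) j "" = PySem.List.pyGetD gs j "" := by
      rw [PySem.List.pyGetD_eq_getElem _ "" hj0 (by simp; omega),
        PySem.List.pyGetD_eq_getElem _ "" hj0 (by omega)]
      exact List.getElem_append_left (by omega)
    simp only [hget]
    rw [if_pos (by omega)]
    unfold pvTS
    cases pvLookup d (PySem.Str.upper (pvCapitalize (PySem.List.pyGetD gs j ""))) <;>
      simp [String.append_assoc]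
  rw [hcongr, PySem.List.foldl_pyRange_zero_pyGetD' gs ""
    (fun nlle_exp s => nlle_exp ++ (pvTS d s ++ "-")) acc, pvFoldl_append]
  -- last iteration: j = gs.length, reads t, no dash
  have hrange : PySem.List.pyRange (gs.length : Int) ((gs.length : Int) + 1) = [(gs.length : Int)] := by
    rw [PySem.List.pyRange_one_cons (by omega)]
    simp [PySem.List.pyRange]
  rw [hrange]
  simp only [List.foldl_cons, List.foldl_nil]
  have hget : PySem.List.pyGetD (gs ++ [t]) (gs.length : Int) "" = t := by
    rw [PySem.List.pyGetD_eq_getElem _ "" (by positivity) (by simp)]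
    simp
  simp only [hget]
  rw [if_neg (by omega)]
  unfold pvTS
  cases pvLookup d (PySem.Str.upper (pvCapitalize t)) <;> simp [String.append_assoc]

-- pvAV on gs ++ [t] in dashed-prefix form
lemma pvAV_append (d : List (String × String)) (gs : List (List Char)) (t : List Char) :
    pvAV d (gs ++ [t]) =
      pvJoinS (gs.map (fun g => pvTS d (String.ofList g) ++ "-")) ++ pvTS d (String.ofList t) := by
  induction gs with
  | nil => simp [pvAV, pvJoinS]
  | cons g gs ih =>
    cases gs with
    | nil => simp [pvAV, pvJoinS, String.append_assoc]
    | cons g' gs' =>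
      simp only [List.cons_append, pvAV] at ih ⊢
      rw [ih]
      simp [pvJoinS, String.append_assoc]

-- String-level split? reduced to pvSplit
lemma pvStrSplit (s sep : String) (c0 : Char) (hsep : sep.toList = [c0]) :
    (PySem.Str.split? s sep).getD [] = (pvSplit c0 s.toList).map String.ofList := by
  have h := PySem.Str.split?_map s sep
  rw [hsep] at h
  cases e : PySem.Str.split? s sep with
  | none => rw [e] at h; simp [PySem.Chars.split?] at h
  | some l =>
    rw [e] at h
    simp only [Option.map_some] at h
    have h2 : l.map String.toList = PySem.Chars.splitOn s.toList [c0] := by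
      simpa [PySem.Chars.split?] using h
    rw [pvSplitOn_eq] at h2
    have h3 : l = (pvSplit c0 s.toList).map String.ofList := by
      have h4 := congrArg (List.map String.ofList) h2
      simpa [List.map_map, Function.comp_def, String.ofList_toList] using h4
    simp [h3]

-- one outer-loop step on a dash-split group
lemma pvStep (d : List (String × String)) (g : List Char) (acc : String) :
    pvInner d ((pvSplit '-' g).map String.ofList) acc = acc ++ pvAV d (pvSplit '-' g) := by
  rcases List.eq_nil_or_concat' (pvSplit '-' g) with h | ⟨gl, tl, h⟩
  · exact absurd h (pvSplit_ne_nil _ _)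
  · rw [h, List.map_append, List.map_singleton, pvInnerRange, pvAV_append, List.map_map,
      String.append_assoc]
    rfl

-- A port equals pvProcA
lemma pvA_eq (expression : String) (d : List (String × String)) :
    reconstituer_expression expression d = pvProcA d expression.toList := by
  have hA : reconstituer_expression expression d =
      (let T := ((PySem.Str.split? expression "'").getD []).map
        (fun elem => (PySem.Str.split? elem "-").getD [])
      (PySem.List.pyRange 0 ((T.length : Int))).foldl
        (fun acc i => pvInner d (PySem.List.pyGetD T i []) acc) "") := rfl
  rw [hA]
  simp only [pvStrSplit _ "'" '\'' rfl, pvStrSplit _ "-" '-' rfl, List.map_map]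
  rw [PySem.List.foldl_pyRange_zero_pyGetD' _ ([] : List String)
    (fun acc grp => pvInner d grp acc) ""]
  rw [List.foldl_map]
  have hcongr := PySem.List.foldl_congr_mem (pvSplit '\'' expression.toList)
    (fun acc g => pvInner d ((fun elem => (pvSplit '-' elem.toList).map String.ofList)
      (String.ofList g)) acc)
    (fun acc g => acc ++ pvAV d (pvSplit '-' g)) ""
    (by
      intro a g _
      simp only [String.toList_ofList]
      exact pvStep d g a)
  simp only [Function.comp_def] at *
  rw [hcongr, pvFoldl_append]
  simp [pvProcA]

-- out-accumulator of the scan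
lemma pvScan_out (d : List (String × String)) :
    ∀ (cs tok : List Char) (out : List String),
      pvScan d cs tok out = out ++ pvScan d cs tok [] := by
  intro cs
  induction cs with
  | nil => intro tok out; simp [pvScan]
  | cons c cs ih =>
    intro tok out
    simp only [pvScan]
    split_ifs <;> rw [ih] <;> rw [ih [] ([] ++ _)] <;> simp

-- MAIN char-level lemma
lemma pvMain (d : List (String × String)) :
    ∀ (cs p : List Char), '\'' ∉ p → '-' ∉ p →
      pvProcA d (p ++ cs) = pvJoinS (pvScan d cs p []) := by
  intro cs
  induction cs with
  | nil =>
    intro p hp1 hp2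
    unfold pvProcA
    rw [List.append_nil, pvSplit_of_not_mem _ p hp1, List.map_singleton,
      pvSplit_of_not_mem _ p hp2]
    simp [pvAV, pvJoinS, pvScan, pvFlush_eq]
  | cons c cs ih =>
    intro p hp1 hp2
    have ihe : pvProcA d cs = pvJoinS (pvScan d cs [] []) := by
      simpa using ih [] (by simp) (by simp)
    by_cases h1 : c = '\''
    · subst h1
      unfold pvProcA
      rw [pvSplit_append _ p _ hp1]
      have hs : pvSplit '\'' ('\'' :: cs) = [] :: pvSplit '\'' cs := by simp [pvSplit]
      rw [hs]
      simp only [List.headI_cons, List.tail_cons, List.map_cons, pvJoinS, List.append_nil]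
      rw [pvSplit_of_not_mem '-' p hp2]
      rw [pvScan, if_pos rfl, pvScan_out]
      simp only [List.nil_append, List.singleton_append, pvJoinS]
      rw [← ihe]
      simp [pvAV, pvProcA, pvFlush_eq]
    · by_cases h2 : c = '-'
      · subst h2
        unfold pvProcA
        rw [pvSplit_append _ p _ hp1]
        have hs : pvSplit '\'' ('-' :: cs) =
            ('-' :: (pvSplit '\'' cs).headI) :: (pvSplit '\'' cs).tail := by
          simp [pvSplit]
        rw [hs]
        simp only [List.headI_cons, List.tail_cons, List.map_cons, pvJoinS]
        have hq : pvSplit '-' (p ++ '-' :: (pvSplit '\'' cs).headI) =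
            p :: pvSplit '-' (pvSplit '\'' cs).headI := by
          rw [pvSplit_append _ p _ hp2]
          simp [pvSplit]
        rw [hq]
        cases hhs : pvSplit '-' (pvSplit '\'' cs).headI with
        | nil => exact absurd hhs (pvSplit_ne_nil _ _)
        | cons h' t' =>
          simp only [pvAV]
          rw [pvScan, if_neg h1, if_pos rfl, pvScan_out]
          simp only [List.nil_append, List.cons_append, pvJoinS]
          rw [← ihe]
          unfold pvProcA
          conv_rhs => rw [← pvSplit_head_tail '\'' cs]
          simp only [List.map_cons, pvJoinS, hhs, pvFlush_eq]
          simp [String.append_assoc]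
      · have hp1' : '\'' ∉ p ++ [c] := by
          simp [hp1]; exact fun h => h1 h.symm
        have hp2' : '-' ∉ p ++ [c] := by
          simp [hp2]; exact fun h => h2 h.symm
        have := ih (p ++ [c]) hp1' hp2'
        rw [pvScan, if_neg h1, if_neg h2]
        simpa using this

-- ===== VERDICT (by name: the statement is the Claim_ definition above) =====
theorem reconstituer_expression_spec : Claim_equal_reconstituer_expression := by
  intro expression d _
  unfold Spec_reconstituer_expression reconstituer_expression_alt
  rw [pvA_eq, pvJoin_eq]
  simpa using pvMain d expression.toList [] (by simp) (by simp)
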